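-- pv_equiv track=rewrite | github.com/sloppycoder/sec_doc_tool | tests/test_text_chunker.py | _max_gap_in_text
-- ===== SOURCE A (Python) =====
-- def _max_gap_in_text(text_content: str):
--     lines = text_content.split("\n")
--     table_lines = [i for i, line in enumerate(lines) if "|" in line and line.strip()]
--
--     # Count gaps between consecutive table rows
--     empty_line_gaps = []
--     for i in range(len(table_lines) - 1):
--         current_row_idx = table_lines[i]
--         next_row_idx = table_lines[i + 1]
--         gap = next_row_idx - current_row_idx - 1
--         if gap > 0:
--             empty_line_gaps.append(gap)
--
--     max_gap = max(empty_line_gaps) if empty_line_gaps else 0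
--     return max_gap
-- ===== SOURCE B (Python) =====
-- def _max_gap_in_text(text_content: str):
--     last_table_idx = None
--     max_gap = 0
--     for idx, line in enumerate(text_content.split("\n")):
--         if "|" in line and line.strip():
--             if last_table_idx is not None:
--                 gap = idx - last_table_idx - 1
--                 if gap > 0:
--                     max_gap = max(max_gap, gap)
--             last_table_idx = idx
--     return max_gap
-- ===== Notes on version B (the rewrite author's own statement) =====
-- stated objective: simpler
-- what changed: Replaces the three-stage pipeline (build the list of table-line indices, then an index loop collecting a list of gaps, then max) with a single streaming pass over enumerate(lines) that keeps only two scalars, the last table-line index and the running max gap.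
import Mathlib
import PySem

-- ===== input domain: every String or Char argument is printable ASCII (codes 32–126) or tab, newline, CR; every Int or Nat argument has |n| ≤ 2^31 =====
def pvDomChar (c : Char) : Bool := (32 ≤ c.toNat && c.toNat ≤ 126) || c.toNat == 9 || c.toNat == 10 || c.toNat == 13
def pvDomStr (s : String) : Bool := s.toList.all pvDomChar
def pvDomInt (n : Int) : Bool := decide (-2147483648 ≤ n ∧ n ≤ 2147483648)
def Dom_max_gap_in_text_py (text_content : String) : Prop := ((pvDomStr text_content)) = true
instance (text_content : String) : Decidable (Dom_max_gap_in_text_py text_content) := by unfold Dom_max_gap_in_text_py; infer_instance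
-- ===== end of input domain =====

-- B replaces A's build-index-list / collect-gap-list / max pipeline by one streaming pass
-- keeping two scalars (last table-line index, running max gap); objective: simpler.

-- ===== PORT A =====
-- '"|" in line and line.strip()' (strip truthy ⟺ nonempty), shared by both ports
def pvIsTable (line : String) : Bool :=
  PySem.Str.isIn "|" line && !(PySem.Str.strip line == "")

def max_gap_in_text_py (text_content : String) : Int :=
  let lines := (PySem.Str.split? text_content "\n").getD []
  let table_lines : List Int :=
    ((PySem.List.enumerate lines 0).filter (fun p => pvIsTable p.2)).map (·.1)
  let empty_line_gaps : List Int :=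
    (PySem.List.pyRange 0 ((table_lines.length : Int) - 1) 1).foldl
      (fun acc i =>
        let current_row_idx := PySem.List.pyGetD table_lines i 0
        let next_row_idx := PySem.List.pyGetD table_lines (i + 1) 0
        let gap := next_row_idx - current_row_idx - 1
        if gap > 0 then acc ++ [gap] else acc) []
  match PySem.List.max? empty_line_gaps (fun x => x) with
  | some m => m
  | none => 0

-- ===== PORT B =====
def max_gap_in_text_py_alt (text_content : String) : Int :=
  ((PySem.List.enumerate ((PySem.Str.split? text_content "\n").getD []) 0).foldl
    (fun (s : Option Int × Int) p =>
      if pvIsTable p.2 then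
        ( some p.1,
          match s.1 with
          | some l => let gap := p.1 - l - 1; if gap > 0 then max s.2 gap else s.2
          | none => s.2 )
      else s) (none, 0)).2

-- ===== PRECONDITION & SPEC =====
def Spec_max_gap_in_text_py (text_content : String) (out : Int) : Prop := out = max_gap_in_text_py_alt text_content
instance (text_content : String) (out : Int) : Decidable (Spec_max_gap_in_text_py text_content out) := by unfold Spec_max_gap_in_text_py; infer_instance

-- ===== CLAIM (what is proved, stated in full; the proofs are below) =====
def Claim_equal_max_gap_in_text_py : Prop := ∀ (text_content : String), Dom_max_gap_in_text_py text_content → Spec_max_gap_in_text_py text_content (max_gap_in_text_py text_content)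

-- ===== LEMMAS AND PROOFS =====

-- the gap list A collects, phrased structurally over the index list
def pvGapsR : List Int → List Int
  | a :: b :: t => (if b - a - 1 > 0 then [b - a - 1] else []) ++ pvGapsR (b :: t)
  | _ => []

-- 'if g > 0: out.append(g)' loop as a flatMap
lemma pvFoldIf (l : List Int) (f : Int → Int) (acc : List Int) :
    l.foldl (fun acc i => if f i > 0 then acc ++ [f i] else acc) acc
      = acc ++ l.flatMap (fun i => if f i > 0 then [f i] else []) := by
  induction l generalizing acc with
  | nil => simp
  | cons x t ih => simp only [List.foldl_cons, List.flatMap_cons]; split_ifs <;> simp [ih]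

-- A's gap loop equals pvGapsR (Nat-range form)
lemma pvGaps_nat (ts : List Int) :
    (List.range (ts.length - 1)).flatMap
      (fun k => if ts.getD (k + 1) 0 - ts.getD k 0 - 1 > 0
        then [ts.getD (k + 1) 0 - ts.getD k 0 - 1] else []) = pvGapsR ts := by
  match ts with
  | [] => simp [pvGapsR]
  | [a] => simp [pvGapsR]
  | a :: b :: t =>
    have h : (a :: b :: t : List Int).length - 1 = t.length + 1 := by simp
    rw [h, List.range_succ_eq_map, List.flatMap_cons, List.flatMap_map]
    have h2 : (fun k => if (a :: b :: t : List Int).getD (k.succ + 1) 0 - (a :: b :: t : List Int).getD k.succ 0 - 1 > 0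
        then [(a :: b :: t : List Int).getD (k.succ + 1) 0 - (a :: b :: t : List Int).getD k.succ 0 - 1] else [])
        = (fun k => if (b :: t : List Int).getD (k + 1) 0 - (b :: t : List Int).getD k 0 - 1 > 0
        then [(b :: t : List Int).getD (k + 1) 0 - (b :: t : List Int).getD k 0 - 1] else []) := by
      funext k; simp
    have h3 := pvGaps_nat (b :: t)
    simp only [List.length_cons, Nat.add_sub_cancel] at h3
    rw [h2, h3]
    simp [pvGapsR]

lemma pvGaps_eq (ts : List Int) :
    (PySem.List.pyRange 0 ((ts.length : Int) - 1) 1).foldl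
      (fun acc i =>
        let current_row_idx := PySem.List.pyGetD ts i 0
        let next_row_idx := PySem.List.pyGetD ts (i + 1) 0
        let gap := next_row_idx - current_row_idx - 1
        if gap > 0 then acc ++ [gap] else acc) [] = pvGapsR ts := by
  rw [pvFoldIf _ (fun i => PySem.List.pyGetD ts (i + 1) 0 - PySem.List.pyGetD ts i 0 - 1) []]
  rw [PySem.List.pyRange_one, List.flatMap_map]
  have hb : (((ts.length : Int) - 1) - 0).toNat = ts.length - 1 := by omega
  rw [hb]
  have h2 : (fun (k : Nat) => if PySem.List.pyGetD ts ((0 : Int) + k + 1) 0 - PySem.List.pyGetD ts ((0 : Int) + k) 0 - 1 > 0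
      then [PySem.List.pyGetD ts ((0 : Int) + k + 1) 0 - PySem.List.pyGetD ts ((0 : Int) + k) 0 - 1] else [])
      = (fun (k : Nat) => if ts.getD (k + 1) 0 - ts.getD k 0 - 1 > 0
      then [ts.getD (k + 1) 0 - ts.getD k 0 - 1] else []) := by
    funext k
    have e1 : (0 : Int) + k + 1 = ((k + 1 : Nat) : Int) := by omega
    have e2 : (0 : Int) + k = ((k : Nat) : Int) := by omega
    rw [e1, e2, PySem.List.pyGetD_natCast, PySem.List.pyGetD_natCast]
  rw [List.nil_append, h2, pvGaps_nat]

lemma pvGapsR_pos (ts : List Int) : ∀ g ∈ pvGapsR ts, 0 < g := by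
  match ts with
  | [] => simp [pvGapsR]
  | [a] => simp [pvGapsR]
  | a :: b :: t =>
    intro g hg
    simp only [pvGapsR, List.mem_append] at hg
    rcases hg with hg | hg
    · split_ifs at hg with h
      · simp only [List.mem_singleton] at hg; omega
      · simp at hg
    · exact pvGapsR_pos (b :: t) g hg

-- A's "max(gaps) if gaps else 0" as a running max from 0
lemma pvMax_eq_foldl (gs : List Int) (hpos : ∀ g ∈ gs, 0 < g) :
    (match PySem.List.max? gs (fun x => x) with
      | some m => m
      | none => 0) = gs.foldl max 0 := by
  match gs with
  | [] => rfl
  | x :: t =>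
    rw [PySem.List.max?_id_cons]
    have hx : max 0 x = x := by
      have := hpos x (by simp); omega
    simp [hx]

-- folding pvGapsR into a running max is B's scan once a table line was seen
lemma pvFoldB (ts : List Int) (l m : Int) :
    (ts.foldl
      (fun (s : Option Int × Int) j =>
        ( some j,
          match s.1 with
          | some l => let gap := j - l - 1; if gap > 0 then max s.2 gap else s.2
          | none => s.2 )) (some l, m)).2 = (pvGapsR (l :: ts)).foldl max m := by
  induction ts generalizing l m with
  | nil => simp [pvGapsR]
  | cons j t ih =>
    simp only [List.foldl_cons, ih j]
    show _ = ((if j - l - 1 > 0 then [j - l - 1] else []) ++ pvGapsR (j :: t)).foldl max m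
    rw [List.foldl_append]
    split_ifs with h <;> simp

-- B's fold over any (index, line) list, reduced to a fold over the kept indices
lemma pvEnumFold (L : List (Int × String)) (s0 : Option Int × Int) :
    L.foldl
      (fun (s : Option Int × Int) p =>
        if pvIsTable p.2 then
          ( some p.1,
            match s.1 with
            | some l => let gap := p.1 - l - 1; if gap > 0 then max s.2 gap else s.2
            | none => s.2 )
        else s) s0
    = ((L.filter (fun p => pvIsTable p.2)).map (·.1)).foldl
      (fun (s : Option Int × Int) j =>
        ( some j,
          match s.1 with
          | some l => let gap := j - l - 1; if gap > 0 then max s.2 gap else s.2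
          | none => s.2 )) s0 := by
  induction L generalizing s0 with
  | nil => rfl
  | cons p t ih =>
    simp only [List.foldl_cons, List.filter_cons]
    by_cases h : pvIsTable p.2 = true
    · rw [if_pos h, if_pos h, List.map_cons, List.foldl_cons, ih]
    · rw [if_neg h, if_neg h, ih]

lemma pvMain (ts : List Int) :
    (match PySem.List.max? (pvGapsR ts) (fun x => x) with
      | some m => m
      | none => 0)
    = (ts.foldl
      (fun (s : Option Int × Int) j =>
        ( some j,
          match s.1 with
          | some l => let gap := j - l - 1; if gap > 0 then max s.2 gap else s.2
          | none => s.2 )) (none, 0)).2 := by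
  rw [pvMax_eq_foldl _ (pvGapsR_pos ts)]
  match ts with
  | [] => rfl
  | a :: t =>
    rw [List.foldl_cons]
    show _ = (t.foldl _ (some a, 0)).2
    rw [pvFoldB t a 0]

-- ===== VERDICT (by name: the statement is the Claim_ definition above) =====
theorem max_gap_in_text_py_spec : Claim_equal_max_gap_in_text_py := by
  intro text _
  show max_gap_in_text_py text = max_gap_in_text_py_alt text
  unfold max_gap_in_text_py max_gap_in_text_py_alt
  simp only [pvGaps_eq, pvEnumFold, pvMain]
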